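-- pv_equiv track=rewrite | github.com/thomThalas/DND-dice-roll | main.py | DirectionParse
-- ===== SOURCE A (Python) =====
-- def DirectionParse(startIndex, parsingText, endLetters, parseLeft = False, defaultValue: any = "0"):
--     result = ""
--     if startIndex == -1:
--         return defaultValue
--     i = startIndex + (-1 if parseLeft else 1)
--     if i >= 0:
--         while i < len(parsingText) and i > -1 and parsingText[i] not in endLetters:
--             if parseLeft:
--                 result = parsingText[i] + result
--             else:
--                 result += parsingText[i]
--             i += (-1 if parseLeft else 1)
--     if result == "":
--         result = defaultValue
--     return result
-- ===== SOURCE B (Python) =====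
-- def DirectionParse(startIndex, parsingText, endLetters, parseLeft=False, defaultValue="0"):
--     if startIndex == -1:
--         return defaultValue
--     n = len(parsingText)
--     if parseLeft:
--         j = startIndex - 1
--         if j >= n:
--             return defaultValue
--         while j >= 0 and parsingText[j] not in endLetters:
--             j -= 1
--         result = parsingText[j + 1:startIndex]
--     else:
--         i = startIndex + 1
--         if i < 0:
--             return defaultValue
--         j = i
--         while j < n and parsingText[j] not in endLetters:
--             j += 1
--         result = parsingText[i:j]
--     return result if result else defaultValue
-- ===== Notes on version B (the rewrite author's own statement) =====
-- stated objective: simpler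
-- what changed: Instead of accumulating the result character by character in a loop (prepending on the left side), B only scans for the boundary index where an end letter (or the string edge) stops the walk and builds the result with a single slice, mapping an empty slice to defaultValue.
import Mathlib
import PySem

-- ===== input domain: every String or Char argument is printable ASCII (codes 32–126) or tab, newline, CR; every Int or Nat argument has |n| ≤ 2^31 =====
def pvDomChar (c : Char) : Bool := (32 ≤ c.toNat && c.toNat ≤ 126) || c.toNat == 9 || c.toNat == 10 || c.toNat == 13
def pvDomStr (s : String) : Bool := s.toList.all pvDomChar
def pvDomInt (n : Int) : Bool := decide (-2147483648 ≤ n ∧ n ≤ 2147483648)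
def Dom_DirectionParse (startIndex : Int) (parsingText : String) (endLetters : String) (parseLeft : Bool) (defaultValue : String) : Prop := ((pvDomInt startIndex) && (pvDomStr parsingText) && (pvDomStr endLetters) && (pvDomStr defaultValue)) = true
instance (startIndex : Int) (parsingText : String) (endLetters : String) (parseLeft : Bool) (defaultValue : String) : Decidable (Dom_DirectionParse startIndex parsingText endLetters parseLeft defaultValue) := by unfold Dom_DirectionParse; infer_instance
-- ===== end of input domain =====

-- B replaces A's char-by-char accumulation by a boundary scan plus one slice (simpler string building, same results).

-- ===== PORT A =====
-- A's while loop: condition "i < len(parsingText) and i > -1 and parsingText[i] not in endLetters";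
-- fuel (length+1) strictly bounds the number of iterations, it only makes the recursion total.
def pvLoopA (txt ends : List Char) (parseLeft : Bool) : Nat → Int → List Char → List Char
  | 0, _, result => result
  | fuel+1, i, result =>
    if 0 ≤ i then
      match txt[i.toNat]? with
      | none => result            -- i ≥ len(parsingText): loop condition fails
      | some c =>
        if ends.contains c then result
        else if parseLeft then pvLoopA txt ends parseLeft fuel (i-1) (c :: result)
        else pvLoopA txt ends parseLeft fuel (i+1) (result ++ [c])
    else result

def DirectionParse (startIndex : Int) (parsingText : String) (endLetters : String) (parseLeft : Bool) (defaultValue : String) : String :=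
  if startIndex = -1 then defaultValue
  else
    let i := startIndex + (if parseLeft then -1 else 1)
    let result := if 0 ≤ i then pvLoopA parsingText.toList endLetters.toList parseLeft (parsingText.toList.length + 1) i [] else []
    if result = [] then defaultValue else String.ofList result

-- ===== PORT B =====
-- B's left scan "while j >= 0 and parsingText[j] not in endLetters": j < len always holds at the
-- loop (B returns before it when j ≥ len); the bound appears here only to make the indexing safe.
def pvScanL (txt ends : List Char) : Nat → Int → Int
  | 0, j => j
  | fuel+1, j =>
    if h : 0 ≤ j ∧ j < (txt.length : Int) then
      if ends.contains (txt[j.toNat]'(by omega)) then j else pvScanL txt ends fuel (j-1)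
    else j

-- B's right scan "while j < n and parsingText[j] not in endLetters": 0 ≤ j always holds at the
-- loop (B returns before it when i < 0); the bound appears here only to make the indexing safe.
def pvScanR (txt ends : List Char) : Nat → Int → Int
  | 0, j => j
  | fuel+1, j =>
    if h : 0 ≤ j ∧ j < (txt.length : Int) then
      if ends.contains (txt[j.toNat]'(by omega)) then j else pvScanR txt ends fuel (j+1)
    else j

def DirectionParse_alt (startIndex : Int) (parsingText : String) (endLetters : String) (parseLeft : Bool) (defaultValue : String) : String :=
  if startIndex = -1 then defaultValue
  else
    let txt := parsingText.toList
    let ends := endLetters.toList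
    if parseLeft then
      let j0 := startIndex - 1
      if (txt.length : Int) ≤ j0 then defaultValue
      else
        let k := pvScanL txt ends (txt.length + 1) j0
        let result := PySem.List.slice txt (some (k + 1)) (some startIndex)
        if result = [] then defaultValue else String.ofList result
    else
      let i := startIndex + 1
      if i < 0 then defaultValue
      else
        let j := pvScanR txt ends (txt.length + 1) i
        let result := PySem.List.slice txt (some i) (some j)
        if result = [] then defaultValue else String.ofList result

-- ===== PRECONDITION & SPEC =====
def Spec_DirectionParse (startIndex : Int) (parsingText : String) (endLetters : String) (parseLeft : Bool) (defaultValue : String) (out : String) : Prop := out = DirectionParse_alt startIndex parsingText endLetters parseLeft defaultValue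
instance (startIndex : Int) (parsingText : String) (endLetters : String) (parseLeft : Bool) (defaultValue : String) (out : String) : Decidable (Spec_DirectionParse startIndex parsingText endLetters parseLeft defaultValue out) := by unfold Spec_DirectionParse; infer_instance

-- ===== CLAIM (what is proved, stated in full; the proofs are below) =====
def Claim_equal_DirectionParse : Prop := ∀ (startIndex : Int) (parsingText : String) (endLetters : String) (parseLeft : Bool) (defaultValue : String), Dom_DirectionParse startIndex parsingText endLetters parseLeft defaultValue → Spec_DirectionParse startIndex parsingText endLetters parseLeft defaultValue (DirectionParse startIndex parsingText endLetters parseLeft defaultValue)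

-- ===== LEMMAS AND PROOFS =====

theorem pvScanR_ge (txt ends : List Char) : ∀ (fuel : Nat) (j : Int), j ≤ pvScanR txt ends fuel j := by
  intro fuel
  induction fuel with
  | zero => intro j; simp [pvScanR]
  | succ n ih =>
    intro j
    simp only [pvScanR]
    split
    · split
      · omega
      · have := ih (j + 1); omega
    · omega

theorem pvScanL_le (txt ends : List Char) : ∀ (fuel : Nat) (j : Int), pvScanL txt ends fuel j ≤ j := by
  intro fuel
  induction fuel with
  | zero => intro j; simp [pvScanL]
  | succ n ih =>
    intro j
    simp only [pvScanL]
    split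
    · split
      · omega
      · have := ih (j - 1); omega
    · omega

theorem pvScanL_ge (txt ends : List Char) : ∀ (fuel : Nat) (j : Int), -1 ≤ j → -1 ≤ pvScanL txt ends fuel j := by
  intro fuel
  induction fuel with
  | zero => intro j h; simpa [pvScanL]
  | succ n ih =>
    intro j h
    simp only [pvScanL]
    split
    · split
      · omega
      · exact ih (j - 1) (by omega)
    · omega

-- right direction: A's accumulating loop equals the segment up to B's boundary scan (same fuel)
theorem pvLoopA_right (txt ends : List Char) : ∀ (fuel : Nat) (i : Int) (r : List Char), 0 ≤ i →
    pvLoopA txt ends false fuel i r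
      = r ++ (txt.drop i.toNat).take (pvScanR txt ends fuel i - i).toNat := by
  intro fuel
  induction fuel with
  | zero => intro i r hi; simp [pvLoopA, pvScanR]
  | succ n ih =>
    intro i r hi
    simp only [pvLoopA, pvScanR, if_pos hi]
    by_cases hlen : i < (txt.length : Int)
    · have hidx : i.toNat < txt.length := by omega
      rw [List.getElem?_eq_getElem hidx]
      simp only [dif_pos (And.intro hi hlen)]
      split
      · simp
      · rw [ih (i + 1) _ (by omega)]
        have hge := pvScanR_ge txt ends n (i + 1)
        rw [List.append_assoc]
        have hdrop : txt.drop i.toNat = txt[i.toNat]'hidx :: txt.drop (i.toNat + 1) :=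
          List.drop_eq_getElem_cons hidx
        rw [hdrop]
        have h1 : (pvScanR txt ends n (i + 1) - i).toNat
            = (pvScanR txt ends n (i + 1) - (i + 1)).toNat + 1 := by omega
        have h2 : (i + 1).toNat = i.toNat + 1 := by omega
        rw [h1, h2, List.take_succ_cons]
        simp
    · have : txt[i.toNat]? = none := by
        rw [List.getElem?_eq_none]; omega
      rw [this]
      simp only [dif_neg (by omega : ¬ (0 ≤ i ∧ i < (txt.length : Int)))]
      simp

-- left direction: A's prepending loop equals the segment from just after B's boundary scan (same fuel)
theorem pvLoopA_left (txt ends : List Char) : ∀ (fuel : Nat) (i : Int) (r : List Char), i < (txt.length : Int) →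
    pvLoopA txt ends true fuel i r
      = (txt.drop (pvScanL txt ends fuel i + 1).toNat).take (i - pvScanL txt ends fuel i).toNat ++ r := by
  intro fuel
  induction fuel with
  | zero => intro i r hi; simp [pvLoopA, pvScanL]
  | succ n ih =>
    intro i r hi
    simp only [pvLoopA, pvScanL]
    by_cases hi0 : 0 ≤ i
    · have hidx : i.toNat < txt.length := by omega
      rw [if_pos hi0, List.getElem?_eq_getElem hidx]
      simp only [dif_pos (And.intro hi0 hi)]
      split
      · simp
      · rw [ih (i - 1) _ (by omega)]
        set k := pvScanL txt ends n (i - 1) with hk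
        have hkle : k ≤ i - 1 := pvScanL_le txt ends n (i - 1)
        have hkge : -1 ≤ k := pvScanL_ge txt ends n (i - 1) (by omega)
        have key : (txt.drop (k + 1).toNat).take (i - k).toNat
            = (txt.drop (k + 1).toNat).take (i - 1 - k).toNat ++ [txt[i.toNat]'hidx] := by
          have hlen2 : (i - k).toNat = (i - 1 - k).toNat + 1 := by omega
          rw [hlen2, List.take_add_one]
          congr 1
          rw [List.getElem?_drop]
          have hidx2 : (k + 1).toNat + (i - 1 - k).toNat = i.toNat := by omega
          rw [hidx2, List.getElem?_eq_getElem hidx]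
          simp
        rw [key, List.append_assoc, List.singleton_append]
        simp
    · rw [if_neg hi0]
      simp only [dif_neg (by omega : ¬ (0 ≤ i ∧ i < (txt.length : Int)))]
      simp

theorem slice_self_nil (txt : List Char) (a : Int) : PySem.List.slice txt (some a) (some a) = ([] : List Char) := by
  have h := PySem.List.length_slice txt a a
  exact List.eq_nil_of_length_eq_zero (by omega)

-- ===== VERDICT (by name: the statement is the Claim_ definition above) =====
theorem DirectionParse_spec : Claim_equal_DirectionParse := by
  intro startIndex parsingText endLetters parseLeft defaultValue _
  unfold Spec_DirectionParse DirectionParse DirectionParse_alt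
  by_cases h1 : startIndex = -1
  · simp [h1]
  · rw [if_neg h1, if_neg h1]
    set txt := parsingText.toList with htxt
    set ends := endLetters.toList with hends
    cases parseLeft with
    | false =>
      simp only [Bool.false_eq_true, if_false]
      set i := startIndex + 1 with hi
      by_cases hpos : 0 ≤ i
      · rw [if_pos hpos, if_neg (by omega : ¬ i < 0)]
        rw [pvLoopA_right txt ends (txt.length + 1) i [] hpos]
        set j := pvScanR txt ends (txt.length + 1) i with hj
        have hge : i ≤ j := pvScanR_ge txt ends (txt.length + 1) i
        rw [PySem.List.slice_toNat txt hpos (by omega)]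
        have : (j - i).toNat = j.toNat - i.toNat := by omega
        rw [List.nil_append, this]
      · rw [if_neg hpos, if_pos (by omega : i < 0)]
        simp
    | true =>
      simp only [if_true]
      have hstep : startIndex + -1 = startIndex - 1 := by ring
      rw [hstep]
      set j0 := startIndex - 1 with hj0
      by_cases hbig : (txt.length : Int) ≤ j0
      · rw [if_pos hbig]
        have hpos : 0 ≤ j0 := by
          have : (0:Int) ≤ (txt.length : Int) := by positivity
          omega
        rw [if_pos hpos]
        have hnil : pvLoopA txt ends true (txt.length + 1) j0 [] = [] := by
          simp only [pvLoopA, if_pos hpos]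
          have : txt[j0.toNat]? = none := by rw [List.getElem?_eq_none]; omega
          rw [this]
        rw [hnil]
        simp
      · rw [if_neg hbig]
        by_cases hpos : 0 ≤ j0
        · rw [if_pos hpos]
          rw [pvLoopA_left txt ends (txt.length + 1) j0 [] (by omega)]
          set k := pvScanL txt ends (txt.length + 1) j0 with hk
          have hkle : k ≤ j0 := pvScanL_le txt ends (txt.length + 1) j0
          have hkge : -1 ≤ k := pvScanL_ge txt ends (txt.length + 1) j0 (by omega)
          rw [PySem.List.slice_toNat txt (by omega : (0:Int) ≤ k + 1) (by omega : (0:Int) ≤ startIndex)]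
          have heq : startIndex.toNat - (k + 1).toNat = (j0 - k).toNat := by omega
          rw [List.append_nil, heq]
        · rw [if_neg hpos]
          have hkk : pvScanL txt ends (txt.length + 1) j0 = j0 := by
            simp only [pvScanL]
            rw [dif_neg (by omega : ¬ (0 ≤ j0 ∧ j0 < (txt.length : Int)))]
          rw [hkk]
          have hsi : j0 + 1 = startIndex := by omega
          rw [hsi, slice_self_nil]
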